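-- pv_equiv track=rewrite | github.com/infinitexzero-AI/AI-MasterMind-Alliance | 01_Areas/Codebases/ailcc/scripts/storage_analyzer.py | recommend_migrations
-- ===== SOURCE A (Python) =====
-- from typing import Dict, List, Tuple
--
-- def recommend_migrations(files: List[Dict]) -> Dict[str, List[Dict]]:
--     """Generate migration recommendations by category"""
--     recommendations = {
--         'photos': [],
--         'videos': [],
--         'photo_library': [],
--         'documents': [],
--         'archives': [],
--         'applications': [],
--         'other': []
--     }
--
--     for file in files:
--         category = file['category']
--         if category in recommendations:
--             recommendations[category].append(file)
--
--     return recommendations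
-- ===== SOURCE B (Python) =====
-- CATEGORIES = ['photos', 'videos', 'photo_library', 'documents', 'archives',
--               'applications', 'other']
--
--
-- def recommend_migrations(files):
--     """Generate migration recommendations by category"""
--     return {cat: [f for f in files if f['category'] == cat]
--             for cat in CATEGORIES}
-- ===== Notes on version B (the rewrite author's own statement) =====
-- stated objective: alternative
-- what changed: B builds each bucket by a per-category scan over the files (a dict comprehension over the seven fixed category keys) instead of A's single bucketing pass that mutates a pre-built dict of empty lists.
import Mathlib
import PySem

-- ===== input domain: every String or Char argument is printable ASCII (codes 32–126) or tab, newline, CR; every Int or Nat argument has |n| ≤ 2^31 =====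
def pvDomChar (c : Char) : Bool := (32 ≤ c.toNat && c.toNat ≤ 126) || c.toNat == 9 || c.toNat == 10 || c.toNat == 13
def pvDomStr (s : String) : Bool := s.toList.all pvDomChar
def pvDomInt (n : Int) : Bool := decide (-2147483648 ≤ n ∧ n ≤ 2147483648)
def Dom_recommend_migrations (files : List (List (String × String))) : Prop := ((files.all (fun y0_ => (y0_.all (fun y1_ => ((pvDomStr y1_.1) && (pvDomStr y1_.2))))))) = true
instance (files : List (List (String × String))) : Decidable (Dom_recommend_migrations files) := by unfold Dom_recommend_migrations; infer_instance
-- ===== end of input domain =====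

-- B transposes A's loop: one filtering scan of the files per fixed category key instead of
-- A's single pass mutating a pre-built dict of empty buckets; same results, similar cost.

-- ===== PORT A =====

-- file['category'] on the dict-typed element (none = KeyError, excluded by Pre_)
def pvCat (file : List (String × String)) : Option String :=
  (PySem.Dict.ofList file).get? "category"

-- the loop body: category = file['category']; if category in recommendations: append
def pvStep (d : PySem.Dict String (List (List (String × String))))
    (file : List (String × String)) : PySem.Dict String (List (List (String × String))) :=
  match pvCat file with
  | none => d
  | some c => if d.contains c then d.modify c [] (· ++ [file]) else d

def pvInit : PySem.Dict String (List (List (String × String))) :=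
  PySem.Dict.ofList [("photos", []), ("videos", []), ("photo_library", []),
    ("documents", []), ("archives", []), ("applications", []), ("other", [])]

def recommend_migrations (files : List (List (String × String))) :
    List (String × List (List (String × String))) :=
  (files.foldl pvStep pvInit).items

-- ===== PORT B =====

def pvCategories : List String :=
  ["photos", "videos", "photo_library", "documents", "archives", "applications", "other"]

def recommend_migrations_alt (files : List (List (String × String))) :
    List (String × List (List (String × String))) :=
  pvCategories.map (fun c => (c, files.filter (fun f => pvCat f == some c)))

-- ===== PRECONDITION & SPEC =====
-- Pre_ excludes files lacking a 'category' key, on which the Python A raises KeyError.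
def Pre_recommend_migrations (files : List (List (String × String))) : Prop :=
  ∀ f ∈ files, "category" ∈ f.map Prod.fst
instance (files : List (List (String × String))) : Decidable (Pre_recommend_migrations files) := by unfold Pre_recommend_migrations; infer_instance

def pvWitness_recommend_migrations : (List (List (String × String))) :=
  [[("category", "photos"), ("size", "3")], [("category", "junk")]]

def Spec_recommend_migrations (files : List (List (String × String))) (out : List (String × List (List (String × String)))) : Prop := out = recommend_migrations_alt files
instance (files : List (List (String × String))) (out : List (String × List (List (String × String)))) : Decidable (Spec_recommend_migrations files out) := by unfold Spec_recommend_migrations; infer_instance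

-- ===== CLAIM (what is proved, stated in full; the proofs are below) =====
def Claim_equal_recommend_migrations : Prop := ∀ (files : List (List (String × String))), Dom_recommend_migrations files → Pre_recommend_migrations files → Spec_recommend_migrations files (recommend_migrations files)

-- ===== LEMMAS AND PROOFS =====

-- keys are invariant through the fold (the guard only modifies existing keys)
theorem pv_keys_fold (l : List (List (String × String)))
    (d : PySem.Dict String (List (List (String × String)))) :
    (l.foldl pvStep d).keys = d.keys := by
  induction l generalizing d with
  | nil => rfl
  | cons f fs ih =>
    simp only [List.foldl_cons]
    rw [ih]
    unfold pvStep
    cases pvCat f with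
    | none => rfl
    | some c =>
      by_cases hc : d.contains c = true
      · simp only [hc, if_true, PySem.Dict.modify, PySem.Dict.keys_insert_of_contains _ _ hc]
      · simp [hc]

theorem pv_getD_fold (l : List (List (String × String)))
    (d : PySem.Dict String (List (List (String × String)))) (c : String)
    (h : d.contains c = true) :
    (l.foldl pvStep d).getD c [] = d.getD c [] ++ l.filter (fun f => pvCat f == some c) := by
  induction l generalizing d with
  | nil => simp
  | cons f fs ih =>
    simp only [List.foldl_cons, List.filter_cons]
    cases hl : pvCat f with
    | none =>
      simp only [pvStep, hl]
      simp [ih d h]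
    | some c' =>
      by_cases hc' : d.contains c' = true
      · by_cases hcc : c' = c
        · subst hcc
          simp only [pvStep, hl, hc', if_true]
          rw [ih _ (by rw [PySem.Dict.contains_modify]; simp [h])]
          simp [PySem.Dict.getD_modify_self, List.append_assoc]
        · simp only [pvStep, hl, hc', if_true]
          rw [ih _ (by rw [PySem.Dict.contains_modify]; simp [h])]
          rw [PySem.Dict.getD_modify_of_ne _ _ _ (Ne.symm hcc)]
          simp [show (some c' == some c) = false by simp [hcc]]
      · have hcc : c' ≠ c := fun e => hc' (e ▸ h)
        have hfalse : d.contains c' = false := by simpa using hc'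
        simp only [pvStep, hl, hfalse, Bool.false_eq_true, if_false]
        rw [ih d h]
        simp [show (some c' == some c) = false by simp [hcc]]

theorem recommend_migrations_eq_alt (files : List (List (String × String))) :
    recommend_migrations files = recommend_migrations_alt files := by
  unfold recommend_migrations recommend_migrations_alt
  have hkeys : (files.foldl pvStep pvInit).keys = pvCategories := by
    rw [pv_keys_fold]; rfl
  have hnd : (files.foldl pvStep pvInit).keys.Nodup := by
    rw [hkeys]; decide
  rw [PySem.Dict.items_eq_map_keys _ hnd [], hkeys]
  apply List.map_congr_left
  intro c hc
  have hcont : pvInit.contains c = true := by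
    fin_cases hc <;> decide
  have hinit : pvInit.getD c [] = [] := by
    fin_cases hc <;> decide
  rw [pv_getD_fold files pvInit c hcont, hinit, List.nil_append]

-- ===== VERDICT (by name: the statement is the Claim_ definition above) =====
theorem recommend_migrations_spec : Claim_equal_recommend_migrations := by
  intro files _ _
  exact recommend_migrations_eq_alt files
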